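-- pv_equiv track=rewrite | github.com/Naboo22/LDA_Doc_Retrieval | utils.py | get_word_pairs
-- ===== SOURCE A (Python) =====
-- def get_word_pairs(top_words):
--
--     # Get all possible word pairs (ignoring order)
--     word_pairs = {}
--     seen_words = []
--     for word_A in top_words:
--         seen_words.append(word_A) # so that we don't get repeat pairs
--         for word_B in [word for word in top_words if word not in seen_words]:
--             word_pair = (word_A, word_B)
--             word_pairs[word_pair] = 0
--
--     return word_pairs
-- ===== SOURCE B (Python) =====
-- def get_word_pairs(top_words):
--     # Dedup once (first-occurrence order), then pair each word with all later distinct words.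
--     def pairs(ws):
--         if not ws:
--             return {}
--         head, rest = ws[0], ws[1:]
--         d = {(head, w): 0 for w in rest}
--         d.update(pairs(rest))
--         return d
--     return pairs(list(dict.fromkeys(top_words)))
-- ===== Notes on version B (the rewrite author's own statement) =====
-- stated objective: simpler
-- what changed: B dedups the input once with dict.fromkeys (first-occurrence order) and then emits the pairs by a single structural recursion (head paired with every later distinct word), instead of A's per-element rebuild of a filtered list via repeated membership scans of the growing seen_words list.
import Mathlib
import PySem

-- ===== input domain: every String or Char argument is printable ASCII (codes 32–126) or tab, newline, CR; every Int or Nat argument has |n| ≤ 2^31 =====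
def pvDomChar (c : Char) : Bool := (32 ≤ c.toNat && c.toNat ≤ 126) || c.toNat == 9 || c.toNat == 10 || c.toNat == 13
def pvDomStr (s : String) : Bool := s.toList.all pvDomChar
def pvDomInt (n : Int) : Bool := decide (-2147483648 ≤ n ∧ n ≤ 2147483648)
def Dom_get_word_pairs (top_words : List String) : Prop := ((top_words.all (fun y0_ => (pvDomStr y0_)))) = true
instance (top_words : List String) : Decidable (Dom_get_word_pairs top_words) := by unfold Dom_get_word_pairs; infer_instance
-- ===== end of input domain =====

-- B dedups the input once (dict.fromkeys) and pairs each distinct word with all later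
-- distinct words by structural recursion, replacing A's repeated membership scans: simpler.

-- ===== PORT A =====
def get_word_pairs (top_words : List String) : List (String × String × Int) :=
  ((top_words.foldl
      (fun (st : PySem.Dict (String × String) Int × List String) word_A =>
        ((top_words.filter (fun word => decide (word ∉ st.2 ++ [word_A]))).foldl
            (fun wp word_B => wp.insert (word_A, word_B) 0) st.1,
         st.2 ++ [word_A]))
      (PySem.Dict.empty, [])).1.items).map (fun p => (p.1.1, p.1.2, p.2))

-- ===== PORT B =====
-- pairs(ws) from Source B: pair the head with every later word, recurse on the tail
def pvPairs : List String → List (String × String × Int)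
  | [] => []
  | x :: xs => xs.map (fun y => (x, y, (0 : Int))) ++ pvPairs xs

def get_word_pairs_alt (top_words : List String) : List (String × String × Int) :=
  pvPairs (PySem.List.dedup top_words)

-- ===== PRECONDITION & SPEC =====
def Spec_get_word_pairs (top_words : List String) (out : List (String × String × Int)) : Prop := out = get_word_pairs_alt top_words
instance (top_words : List String) (out : List (String × String × Int)) : Decidable (Spec_get_word_pairs top_words out) := by unfold Spec_get_word_pairs; infer_instance

-- ===== CLAIM (what is proved, stated in full; the proofs are below) =====
def Claim_equal_get_word_pairs : Prop := ∀ (top_words : List String), Dom_get_word_pairs top_words → Spec_get_word_pairs top_words (get_word_pairs top_words)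

-- ===== LEMMAS AND PROOFS =====

-- dedup-with-seen-accumulator: the distinct elements of the list not in s, in first-occurrence order
def pvG (s : List String) : List String → List String
  | [] => []
  | b :: bs => if b ∈ s then pvG s bs else b :: pvG (s ++ [b]) bs

-- A's outer-loop step (definitionally the step function of get_word_pairs's fold)
def pvStep (top_words : List String)
    (st : PySem.Dict (String × String) Int × List String) (word_A : String) :
    PySem.Dict (String × String) Int × List String :=
  ((top_words.filter (fun word => decide (word ∉ st.2 ++ [word_A]))).foldl
      (fun wp word_B => wp.insert (word_A, word_B) 0) st.1,
   st.2 ++ [word_A])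

-- the items A's outer loop appends while processing ws with seen-list s
def pvPP (s : List String) : List String → List ((String × String) × Int)
  | [] => []
  | a :: ws =>
      (if a ∈ s then [] else (pvG (s ++ [a]) ws).map (fun b => ((a, b), (0 : Int)))) ++
        pvPP (s ++ [a]) ws

-- pvPairs at the items level (keys paired with value 0)
def pvPairsK : List String → List ((String × String) × Int)
  | [] => []
  | x :: xs => xs.map (fun y => ((x, y), (0 : Int))) ++ pvPairsK xs

theorem pvG_congr : ∀ (bs s s' : List String), (∀ x ∈ bs, (x ∈ s ↔ x ∈ s')) →
    pvG s bs = pvG s' bs := by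
  intro bs
  induction bs with
  | nil => intro s s' _; rfl
  | cons b bs ih =>
    intro s s' h
    have hb := h b (by simp)
    simp only [pvG]
    by_cases hbs : b ∈ s
    · rw [if_pos hbs, if_pos (hb.mp hbs)]
      exact ih s s' (fun x hx => h x (by simp [hx]))
    · rw [if_neg hbs, if_neg (fun hh => hbs (hb.mpr hh))]
      congr 1
      refine ih (s ++ [b]) (s' ++ [b]) (fun x hx => ?_)
      simp only [List.mem_append, List.mem_singleton]
      rw [h x (by simp [hx])]

theorem pvG_prefix : ∀ (p ws s : List String), (∀ x ∈ p, x ∈ s) →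
    pvG s (p ++ ws) = pvG s ws := by
  intro p
  induction p with
  | nil => intro ws s _; rfl
  | cons a p ih =>
    intro ws s h
    simp only [List.cons_append, pvG, if_pos (h a (by simp))]
    exact ih ws s (fun x hx => h x (by simp [hx]))

theorem pvG_filter : ∀ (xs s t : List String), (∀ x ∈ t, x ∈ s) →
    pvG s (xs.filter (fun x => decide (x ∉ t))) = pvG s xs := by
  intro xs
  induction xs with
  | nil => intro s t _; rfl
  | cons x xs ih =>
    intro s t h
    by_cases hxt : x ∈ t
    · rw [List.filter_cons_of_neg (by simp [hxt])]
      have hx : pvG s (x :: xs) = pvG s xs := by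
        simp only [pvG, if_pos (h x hxt)]
      rw [hx, ih s t h]
    · rw [List.filter_cons_of_pos (by simp [hxt])]
      simp only [pvG]
      by_cases hxs : x ∈ s
      · rw [if_pos hxs, if_pos hxs, ih s t h]
      · rw [if_neg hxs, if_neg hxs]
        congr 1
        exact ih (s ++ [x]) t (fun y hy => by simp [h y hy])

theorem pvG_all_mem : ∀ (bs s : List String), (∀ x ∈ bs, x ∈ s) → pvG s bs = [] := by
  intro bs
  induction bs with
  | nil => intro s _; rfl
  | cons b bs ih =>
    intro s h
    simp only [pvG, if_pos (h b (by simp))]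
    exact ih s (fun x hx => h x (by simp [hx]))

theorem mem_pvG : ∀ (bs s : List String) (x : String), x ∈ pvG s bs ↔ x ∈ bs ∧ x ∉ s := by
  intro bs
  induction bs with
  | nil => intro s x; simp [pvG]
  | cons b bs ih =>
    intro s x
    simp only [pvG]
    by_cases hb : b ∈ s
    · rw [if_pos hb, ih s x, List.mem_cons]
      constructor
      · rintro ⟨h1, h2⟩; exact ⟨Or.inr h1, h2⟩
      · rintro ⟨h1 | h1, h2⟩
        · exact absurd (h1 ▸ hb) h2
        · exact ⟨h1, h2⟩
    · rw [if_neg hb, List.mem_cons, ih (s ++ [b]) x, List.mem_cons]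
      simp only [List.mem_append, List.mem_singleton]
      constructor
      · rintro (rfl | ⟨h1, h2⟩)
        · exact ⟨Or.inl rfl, hb⟩
        · exact ⟨Or.inr h1, fun hx => h2 (Or.inl hx)⟩
      · rintro ⟨h1 | h1, h2⟩
        · exact Or.inl h1
        · by_cases hxb : x = b
          · exact Or.inl hxb
          · exact Or.inr ⟨h1, fun hx => hx.elim h2 hxb⟩

theorem pvG_nodup : ∀ (bs s : List String), (pvG s bs).Nodup := by
  intro bs
  induction bs with
  | nil => intro s; simp [pvG]
  | cons b bs ih =>
    intro s
    simp only [pvG]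
    by_cases hb : b ∈ s
    · rw [if_pos hb]; exact ih s
    · rw [if_neg hb]
      refine List.nodup_cons.mpr ⟨?_, ih (s ++ [b])⟩
      intro hmem
      exact ((mem_pvG bs (s ++ [b]) b).mp hmem).2 (by simp)

theorem pvFoldlAdd : ∀ (bs s : List String), List.foldl PySem.Set.add s bs = s ++ pvG s bs := by
  intro bs
  induction bs with
  | nil => intro s; simp [pvG]
  | cons b bs ih =>
    intro s
    simp only [List.foldl_cons, PySem.Set.add, pvG]
    by_cases hb : b ∈ s
    · have hc : PySem.Set.contains s b = true := by
        simp [PySem.Set.contains, hb]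
      rw [if_pos hc, if_pos hb, ih s]
    · have hc : ¬ PySem.Set.contains s b = true := by
        simp [PySem.Set.contains, hb]
      rw [if_neg hc, if_neg hb, ih (s ++ [b])]
      simp

theorem pvDedup_eq (xs : List String) : PySem.List.dedup xs = pvG [] xs := by
  show List.foldl PySem.Set.add ([] : List String) xs = pvG [] xs
  rw [pvFoldlAdd xs []]
  simp

theorem pvGet?_mk_append (l1 l2 : List ((String × String) × Int)) (k : String × String) :
    (PySem.Dict.mk (l1 ++ l2)).get? k =
      ((PySem.Dict.mk l1).get? k).orElse (fun _ => (PySem.Dict.mk l2).get? k) := by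
  simp only [PySem.Dict.get?, List.find?_append]
  cases h : List.find? (fun p => p.1 == k) l1 <;> simp [Option.orElse]

theorem pvInsert_same (d : PySem.Dict (String × String) Int) (k : String × String) (v : Int)
    (hnd : d.keys.Nodup) (h : d.get? k = some v) : d.insert k v = d := by
  have hc : d.contains k = true := by
    rw [PySem.Dict.contains_eq_isSome_get?, h]; rfl
  have hmap : d.items.map (fun p => if (p.1 == k) = true then (k, v) else p) = d.items := by
    have hcongr : ∀ p ∈ d.items, (if (p.1 == k) = true then (k, v) else p) = id p := by
      intro p hp
      obtain ⟨pk, pv⟩ := p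
      by_cases hpk : (pk == k) = true
      · have hk : pk = k := by simpa using hpk
        subst hk
        have hv : d.get? pk = some pv := PySem.Dict.get?_of_mem_items _ hp hnd
        rw [h] at hv
        cases Option.some_inj.mp hv
        simp
      · simp [hpk]
    rw [List.map_congr_left hcongr, List.map_id]
  simp only [PySem.Dict.insert, hc, if_true, hmap]

theorem pvInsert_fresh (d : PySem.Dict (String × String) Int) (k : String × String) (v : Int)
    (h : d.get? k = none) : d.insert k v = PySem.Dict.mk (d.items ++ [(k, v)]) := by
  have hc : d.contains k = false := by
    rw [PySem.Dict.contains_eq_isSome_get?, h]; rfl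
  simp only [PySem.Dict.insert, hc]
  simp

theorem pvGet?_maplist (us : List String) (a x y : String) :
    (PySem.Dict.mk (us.map (fun b => ((a, b), (0 : Int))))).get? (x, y) =
      if x = a ∧ y ∈ us then some 0 else none := by
  induction us with
  | nil => simp [PySem.Dict.get?]
  | cons u us ih =>
    rw [List.map_cons, PySem.Dict.get?_mk_cons, ih]
    by_cases hk : (a, u) = (x, y)
    · rw [if_pos (by simp [hk])]
      have h1 : x = a := (Prod.mk.injEq _ _ _ _ ▸ hk).1.symm
      have h2 : y = u := (Prod.mk.injEq _ _ _ _ ▸ hk).2.symm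
      subst h1; subst h2
      simp
    · rw [if_neg (by simpa using hk)]
      by_cases hx : x = a
      · subst hx
        have hyu : y ≠ u := fun hh => hk (by rw [hh])
        simp [List.mem_cons, hyu]
      · simp [hx]

theorem pvInner (a : String) : ∀ (bs t : List String) (d : PySem.Dict (String × String) Int),
    d.keys.Nodup →
    (∀ b ∈ bs, d.get? (a, b) = if b ∈ t then some 0 else none) →
    bs.foldl (fun wp word_B => wp.insert (a, word_B) 0) d
      = PySem.Dict.mk (d.items ++ (pvG t bs).map (fun b => ((a, b), (0 : Int)))) := by
  intro bs
  induction bs with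
  | nil =>
    intro t d _ _
    simp only [List.foldl_nil, pvG, List.map_nil, List.append_nil]
  | cons b bs ih =>
    intro t d hnd h
    rw [List.foldl_cons]
    have hb := h b (by simp)
    by_cases hbt : b ∈ t
    · rw [if_pos hbt] at hb
      rw [pvInsert_same d (a, b) 0 hnd hb]
      have hg : pvG t (b :: bs) = pvG t bs := by simp only [pvG, if_pos hbt]
      rw [hg]
      exact ih t d hnd (fun b' hb' => h b' (by simp [hb']))
    · rw [if_neg hbt] at hb
      rw [pvInsert_fresh d (a, b) 0 hb]
      have hknew : (PySem.Dict.mk (d.items ++ [((a, b), (0 : Int))])).keys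
          = d.keys ++ [(a, b)] := by
        simp [PySem.Dict.keys]
      have hnotmem : (a, b) ∉ d.keys := by
        rw [← PySem.Dict.get?_eq_none_iff_not_mem_keys]
        exact hb
      have hnd' : (PySem.Dict.mk (d.items ++ [((a, b), (0 : Int))])).keys.Nodup := by
        rw [hknew]
        refine List.Nodup.append hnd (List.nodup_singleton _) ?_
        intro k hk hk2
        exact hnotmem (List.mem_singleton.mp hk2 ▸ hk)
      have h' : ∀ b' ∈ bs,
          (PySem.Dict.mk (d.items ++ [((a, b), (0 : Int))])).get? (a, b')
            = if b' ∈ t ++ [b] then some 0 else none := by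
        intro b' hb'
        rw [pvGet?_mk_append]
        rw [show PySem.Dict.mk d.items = d from rfl]
        by_cases hbb : b' = b
        · subst hbb
          rw [hb]
          simp [PySem.Dict.get?_mk_cons, Option.orElse]
        · have hone : (PySem.Dict.mk [((a, b), (0 : Int))]).get? (a, b') = none := by
            have hne : ¬ ((a, b) == (a, b')) = true := by
              simp only [beq_iff_eq, Prod.mk.injEq]
              rintro ⟨-, h2⟩
              exact hbb h2.symm
            rw [PySem.Dict.get?_mk_cons, if_neg hne]
            rfl
          rw [hone, h b' (by simp [hb'])]
          by_cases hbt' : b' ∈ t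
          · simp [hbt', Option.orElse]
          · simp [hbt', hbb, Option.orElse]
      have hrec := ih (t ++ [b]) (PySem.Dict.mk (d.items ++ [((a, b), (0 : Int))])) hnd' h'
      rw [hrec]
      have hg : pvG t (b :: bs) = b :: pvG (t ++ [b]) bs := by
        simp only [pvG, if_neg hbt]
      rw [hg]
      simp [List.append_assoc]

theorem pvOuter (L : List String) : ∀ (ws p : List String) (d : PySem.Dict (String × String) Int),
    L = p ++ ws →
    d.keys.Nodup →
    (∀ k ∈ d.keys, k.1 ∈ p) →
    (∀ x b, x ∈ p → b ∈ L → b ∉ p → d.get? (x, b) = some 0) →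
    ((ws.foldl (pvStep L) (d, p)).1).items = d.items ++ pvPP p ws := by
  intro ws
  induction ws with
  | nil =>
    intro p d _ _ _ _
    simp [pvPP]
  | cons a ws ih =>
    intro p d hL hnd hkeys hget
    rw [List.foldl_cons]
    have hmemfilter : ∀ b, b ∈ L.filter (fun word => decide (word ∉ p ++ [a])) ↔
        (b ∈ L ∧ b ∉ p ∧ b ≠ a) := by
      intro b
      simp [List.mem_filter, List.mem_append, not_or]
    by_cases ha : a ∈ p
    · -- repeated word: every inserted key was already present with value 0
      have hstep : pvStep L (d, p) a = (d, p ++ [a]) := by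
        simp only [pvStep]
        congr 1
        rw [pvInner a _ L d hnd ?_]
        · rw [pvG_all_mem _ L (fun x hx => ((hmemfilter x).mp hx).1)]
          simp
        · intro b hbmem
          obtain ⟨hbL, hbp, hba⟩ := (hmemfilter b).mp hbmem
          rw [if_pos hbL]
          exact hget a b ha hbL hbp
      rw [hstep]
      have hpp : pvPP p (a :: ws) = pvPP (p ++ [a]) ws := by
        simp only [pvPP, if_pos ha, List.nil_append]
      rw [hpp]
      refine ih (p ++ [a]) d (by simp [hL]) hnd ?_ ?_
      · intro k hk; simp [hkeys k hk]
      · intro x b hx hbL hbp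
        refine hget x b ?_ hbL (fun hb => hbp (by simp [hb]))
        rcases List.mem_append.mp hx with hx | hx
        · exact hx
        · rw [List.mem_singleton.mp hx]; exact ha
    · -- new word a: all pairs (a, b) with b a later distinct word get appended
      have hnewlist : pvG [] (L.filter (fun word => decide (word ∉ p ++ [a])))
          = pvG (p ++ [a]) ws := by
        rw [pvG_congr _ [] (p ++ [a]) ?_]
        · rw [pvG_filter L (p ++ [a]) (p ++ [a]) (fun x hx => hx)]
          rw [hL, show p ++ a :: ws = (p ++ [a]) ++ ws by simp]
          exact pvG_prefix (p ++ [a]) ws (p ++ [a]) (fun x hx => hx)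
        · intro x hx
          obtain ⟨_, hxp, hxa⟩ := (hmemfilter x).mp hx
          simp [hxp, hxa]
      have hfresh : ∀ b ∈ L.filter (fun word => decide (word ∉ p ++ [a])),
          d.get? (a, b) = if b ∈ ([] : List String) then some 0 else none := by
        intro b _
        simp only [List.not_mem_nil, if_neg (fun h => h)]
        rw [PySem.Dict.get?_eq_none_iff_not_mem_keys]
        intro hk
        exact ha (hkeys (a, b) hk)
      have hstep : pvStep L (d, p) a =
          (PySem.Dict.mk (d.items ++ (pvG (p ++ [a]) ws).map (fun b => ((a, b), (0 : Int)))),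
           p ++ [a]) := by
        simp only [pvStep]
        rw [pvInner a _ [] d hnd hfresh, hnewlist]
      rw [hstep]
      set d' := PySem.Dict.mk (d.items ++ (pvG (p ++ [a]) ws).map (fun b => ((a, b), (0 : Int)))) with hd'
      have hkeys' : d'.keys = d.keys ++ (pvG (p ++ [a]) ws).map (fun b => (a, b)) := by
        simp [hd', PySem.Dict.keys, List.map_map, Function.comp]
      have hnd' : d'.keys.Nodup := by
        rw [hkeys']
        refine List.Nodup.append hnd ?_ ?_
        · exact List.Nodup.map (fun x y hxy => by simpa using congrArg Prod.snd hxy)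
            (pvG_nodup ws (p ++ [a]))
        · intro k hk hk'
          obtain ⟨b2, _, hkb⟩ := List.mem_map.mp hk'
          have : k.1 ∈ p := hkeys k hk
          rw [← hkb] at this
          exact ha this
      have hget' : ∀ x b, x ∈ p ++ [a] → b ∈ L → b ∉ p ++ [a] → d'.get? (x, b) = some 0 := by
        intro x b hx hbL hbp'
        have hbp : b ∉ p := fun h => hbp' (by simp [h])
        have hba : b ≠ a := fun h => hbp' (by simp [h])
        rw [hd', pvGet?_mk_append, show PySem.Dict.mk d.items = d from rfl]
        rcases List.mem_append.mp hx with hx | hx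
        · rw [hget x b hx hbL hbp]
          simp [Option.orElse]
        · have hxa : x = a := List.mem_singleton.mp hx
          rw [hxa]
          have hdnone : d.get? (a, b) = none := by
            rw [PySem.Dict.get?_eq_none_iff_not_mem_keys]
            intro hk
            exact ha (hkeys (a, b) hk)
          rw [hdnone]
          simp only [pvGet?_maplist]
          have hbws : b ∈ ws := by
            rcases List.mem_append.mp (hL ▸ hbL) with h | h
            · exact absurd h hbp
            · rcases List.mem_cons.mp h with h | h
              · exact absurd h hba
              · exact h
          have : b ∈ pvG (p ++ [a]) ws := (mem_pvG ws (p ++ [a]) b).mpr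
            ⟨hbws, fun h => hbp' h⟩
          simp [this, Option.orElse]
      have hrec := ih (p ++ [a]) d' (by simp [hL]) hnd' ?_ hget'
      · rw [hrec]
        have hpp : pvPP p (a :: ws) =
            (pvG (p ++ [a]) ws).map (fun b => ((a, b), (0 : Int))) ++ pvPP (p ++ [a]) ws := by
          simp only [pvPP, if_neg ha]
        rw [hpp, hd']
        simp [List.append_assoc]
      · intro k hk
        rw [hkeys'] at hk
        rcases List.mem_append.mp hk with hk | hk
        · simp [hkeys k hk]
        · obtain ⟨b, _, rfl⟩ := List.mem_map.mp hk
          simp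

theorem pvPP_eq_pairsK : ∀ (ws s : List String), pvPP s ws = pvPairsK (pvG s ws) := by
  intro ws
  induction ws with
  | nil => intro s; rfl
  | cons a ws ih =>
    intro s
    simp only [pvPP, pvG]
    by_cases ha : a ∈ s
    · rw [if_pos ha, if_pos ha, ih (s ++ [a])]
      rw [pvG_congr ws (s ++ [a]) s (fun x _ => by simp; intro h; exact h ▸ ha)]
      simp
    · rw [if_neg ha, if_neg ha, ih (s ++ [a])]
      simp [pvPairsK]

theorem pvPairsK_map : ∀ us : List String,
    (pvPairsK us).map (fun p => (p.1.1, p.1.2, p.2)) = pvPairs us := by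
  intro us
  induction us with
  | nil => rfl
  | cons u us ih =>
    simp only [pvPairsK, pvPairs, List.map_append, List.map_map, ih]
    rfl

theorem pvA_eq (top_words : List String) :
    get_word_pairs top_words =
      (((top_words.foldl (pvStep top_words) (PySem.Dict.empty, [])).1).items).map
        (fun p => (p.1.1, p.1.2, p.2)) := rfl

-- ===== VERDICT (by name: the statement is the Claim_ definition above) =====
theorem get_word_pairs_spec : Claim_equal_get_word_pairs := by
  intro top_words _
  unfold Spec_get_word_pairs get_word_pairs_alt
  rw [pvA_eq, pvOuter top_words top_words [] PySem.Dict.empty rfl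
      (by simp [PySem.Dict.keys, PySem.Dict.empty])
      (by simp [PySem.Dict.keys, PySem.Dict.empty])
      (by intro x b hx _ _; simp at hx)]
  rw [pvPP_eq_pairsK, pvDedup_eq]
  simp [PySem.Dict.empty, pvPairsK_map]
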